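-- pv_equiv track=rewrite | github.com/jaredxfeng/pycheckio | scytale_encryption.py | scytale_decipher
-- ===== SOURCE A (Python) =====
-- from typing import Optional
--
-- def scytale_decipher(ciphertext: str, crib: str) -> Optional[str]:
--     out = None
--     for key in range(1, len(ciphertext) + 1):
--         deciphered = ""
--         for row in range(key):
--             deciphered += ciphertext[row:len(ciphertext):key]
--         if crib in deciphered:
--             if out is None:
--                 out = deciphered
--             else:
--                 return None
--     return out
-- ===== SOURCE B (Python) =====
-- from typing import Optional
--
--
-- def scytale_decipher(ciphertext: str, crib: str) -> Optional[str]: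
--     n = len(ciphertext)
--     matches = []
--     for key in range(1, n + 1):
--         rows = [ciphertext[i:i + key] for i in range(0, n, key)]
--         cand = "".join(row[c]
--                        for c in range(key)
--                        for row in rows
--                        if c < len(row))
--         if crib in cand:
--             matches.append(cand)
--             if len(matches) > 1:
--                 return None
--     return matches[0] if matches else None
-- ===== Notes on version B (the rewrite author's own statement) =====
-- stated objective: alternative
-- what changed: B builds each candidate plaintext by splitting the ciphertext into key-sized row chunks and reading the grid column-major (guarded by row length) instead of A's strided slices, and collects matching candidates in a list (returning None once a second match appears) instead of A's out/None flag.
import Mathlib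
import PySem

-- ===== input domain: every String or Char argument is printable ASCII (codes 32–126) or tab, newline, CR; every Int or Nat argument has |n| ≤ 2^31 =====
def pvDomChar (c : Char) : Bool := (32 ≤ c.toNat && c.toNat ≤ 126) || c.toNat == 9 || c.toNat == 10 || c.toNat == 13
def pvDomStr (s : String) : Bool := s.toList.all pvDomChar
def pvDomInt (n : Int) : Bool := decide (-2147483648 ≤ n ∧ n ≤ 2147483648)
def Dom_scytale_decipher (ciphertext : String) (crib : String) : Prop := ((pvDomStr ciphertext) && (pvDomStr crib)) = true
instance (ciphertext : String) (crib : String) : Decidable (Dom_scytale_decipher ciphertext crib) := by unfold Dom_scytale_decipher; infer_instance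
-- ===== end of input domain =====

-- B replaces A's per-key strided slices by a row-chunk grid read column-major and collects
-- the matching plaintexts in a list instead of A's out/None flag (alternative decomposition; same cost).

-- ===== PORT A =====
-- ciphertext[row:len(ciphertext):key]; step is key ≥ 1 here, so slice? is always `some`
-- and the `.getD []` default is never used (exact).
def pvSliceRowA (xs : List Char) (r k : Nat) : List Char :=
  (PySem.List.slice? xs (some (r : Int)) (some (xs.length : Int)) (k : Int)).getD []

-- deciphered = "" ; for row in range(key): deciphered += ciphertext[row:len:key]
def pvDecipherA (xs : List Char) (k : Nat) : List Char :=
  (List.range k).foldl (fun acc r => acc ++ pvSliceRowA xs r k) []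

-- the for-key loop with A's out/early-return-None logic
def pvLoopA (xs cs : List Char) : List Nat → Option (List Char) → Option (List Char)
  | [], out => out
  | k :: ks, out =>
    let d := pvDecipherA xs k
    if PySem.Chars.isIn cs d then
      match out with
      | none => pvLoopA xs cs ks (some d)
      | some _ => none
    else pvLoopA xs cs ks out

def scytale_decipher (ciphertext : String) (crib : String) : Option String :=
  -- range(1, len(ciphertext) + 1)
  (pvLoopA ciphertext.toList crib.toList
      ((List.range ciphertext.toList.length).map (· + 1)) none).map String.ofList

-- ===== PORT B =====
-- rows = [ciphertext[i:i + key] for i in range(0, n, key)]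
def pvRowsB (xs : List Char) (k : Nat) : List (List Char) :=
  (PySem.List.pyRange 0 (xs.length : Int) (k : Int)).map
    (fun i => PySem.List.slice xs (some i) (some (i + (k : Int))))

-- inner generator pass for one column c: row[c] for row in rows if c < len(row)
def pvColB (rows : List (List Char)) (c : Nat) (acc : List Char) : List Char :=
  rows.foldl (fun a row => if h : c < row.length then a ++ [row[c]] else a) acc

-- "".join(row[c] for c in range(key) for row in rows if c < len(row))
def pvCandB (xs : List Char) (k : Nat) : List Char :=
  (List.range k).foldl (fun acc c => pvColB (pvRowsB xs k) c acc) []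

-- the for-key loop collecting matches, returning None as soon as there are two
def pvLoopB (xs cs : List Char) : List Nat → List (List Char) → Option (List Char)
  | [], ms => ms.head?   -- matches[0] if matches else None
  | k :: ks, ms =>
    let cand := pvCandB xs k
    if PySem.Chars.isIn cs cand then
      let ms' := ms ++ [cand]
      if ms'.length > 1 then none else pvLoopB xs cs ks ms'
    else pvLoopB xs cs ks ms

def scytale_decipher_alt (ciphertext : String) (crib : String) : Option String :=
  (pvLoopB ciphertext.toList crib.toList
      ((List.range ciphertext.toList.length).map (· + 1)) []).map String.ofList

-- ===== PRECONDITION & SPEC =====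
def Spec_scytale_decipher (ciphertext : String) (crib : String) (out : Option String) : Prop := out = scytale_decipher_alt ciphertext crib
instance (ciphertext : String) (crib : String) (out : Option String) : Decidable (Spec_scytale_decipher ciphertext crib out) := by unfold Spec_scytale_decipher; infer_instance

-- ===== CLAIM (what is proved, stated in full; the proofs are below) =====
def Claim_equal_scytale_decipher : Prop := ∀ (ciphertext : String) (crib : String), Dom_scytale_decipher ciphertext crib → Spec_scytale_decipher ciphertext crib (scytale_decipher ciphertext crib)

-- ===== LEMMAS AND PROOFS =====
def pvColRead (k c : Nat) : List Char → List Char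
  | [] => []
  | x :: rest => ((x :: rest)[c]?).toList ++ pvColRead k c (rest.drop (k - 1))
termination_by xs => xs.length
decreasing_by simp

lemma pvColRead_cons (k c : Nat) (hk : 0 < k) (x : Char) (rest : List Char) :
    pvColRead k c (x :: rest) = ((x :: rest)[c]?).toList ++ pvColRead k c ((x :: rest).drop k) := by
  obtain ⟨k', rfl⟩ : ∃ k', k = k' + 1 := ⟨k - 1, by omega⟩
  rw [pvColRead]
  simp

lemma pvColRead_nil_of_le (k c : Nat) (xs : List Char) (h : xs.length ≤ c) :
    pvColRead k c xs = [] := by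
  induction hn : xs.length using Nat.strong_induction_on generalizing xs with
  | _ n ih =>
    cases xs with
    | nil => rw [pvColRead]
    | cons x rest =>
      rw [pvColRead]
      rw [List.getElem?_eq_none (by simp at h ⊢; omega)]
      simp only [Option.toList_none, List.nil_append]
      exact ih (rest.drop (k - 1)).length
        (by subst hn; simp only [List.length_drop, List.length_cons]; omega) _
        (by simp only [List.length_cons] at h; simp only [List.length_drop]; omega) rfl

lemma pvFlatMap_eq_colRead (k : Nat) (hk : 0 < k) :
    ∀ (m : Nat) (xs : List Char) (c : Nat), xs.length ≤ c + k * m →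
      (List.range m).flatMap (fun j => (xs[c + k * j]?).toList) = pvColRead k c xs := by
  intro m
  induction m with
  | zero =>
    intro xs c h
    simp only [List.range_zero, List.flatMap_nil]
    exact (pvColRead_nil_of_le k c xs (by omega)).symm
  | succ m ih =>
    intro xs c h
    cases xs with
    | nil => rw [pvColRead]; simp
    | cons x rest =>
      rw [pvColRead_cons k c hk]
      rw [List.range_succ_eq_map, List.flatMap_cons, List.flatMap_map]
      simp only [Nat.mul_zero, Nat.add_zero]
      congr 1
      rw [show (fun j => (((x :: rest)[c + k * (j + 1)]?).toList))
              = (fun j => ((((x :: rest).drop k)[c + k * j]?).toList)) from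
          funext (fun j => by
            rw [List.getElem?_drop, show k + (c + k * j) = c + k * (j + 1) from by ring])]
      exact ih ((x :: rest).drop k) c
        (by simp only [Nat.mul_succ, List.length_cons] at h
            simp only [List.length_drop, List.length_cons]
            omega)


lemma pvSliceRowA_eq_colRead (xs : List Char) (r k : Nat) (hk : 0 < k) :
    pvSliceRowA xs r k = pvColRead k r xs := by
  have hk0 : (k : Int) ≠ 0 := by omega
  have hknlt : ¬ ((k : Int) < 0) := by omega
  have hrnn : ¬ ((r : Int) < 0) := by omega
  simp only [pvSliceRowA, PySem.List.slice?, PySem.List.sliceIndices, if_neg hk0, if_neg hknlt,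
    if_neg hrnn]
  by_cases hrn : r < xs.length
  · have hmin : min (r : Int) (xs.length : Int) = (r : Int) := by omega
    have hlt : ((r : Int)) < (xs.length : Int) := by exact_mod_cast hrn
    rw [hmin]
    rw [if_neg (show ¬ ((xs.length : Int) < 0) by omega)]
    rw [min_self]
    rw [if_pos (show (0 : Int) < (k : Int) by omega), if_pos hlt]
    rw [Option.getD_some]
    have hfn : (fun j : Nat => xs[((r : Int) + (k : Int) * (j : Int)).toNat]?)
        = (fun j : Nat => xs[r + k * j]?) := by
      funext j
      congr 1
    rw [hfn]
    rw [show ∀ (l : List Nat) (f : Nat → Option Char), List.filterMap f l = l.flatMap (fun a => (f a).toList) from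
      fun l f => by induction l with
        | nil => simp
        | cons b bs ih => cases hb : f b <;> simp [hb, ih]]
    apply pvFlatMap_eq_colRead k hk
    have hq : 0 ≤ ((xs.length : Int) - r + k - 1) / k := Int.ediv_nonneg (by omega) (by omega)
    have h1 : ((xs.length : Int) - r + k - 1) < (((xs.length : Int) - r + k - 1) / k + 1) * k :=
      Int.lt_ediv_add_one_mul_self _ (by omega)
    have key : (xs.length : Int) ≤ (r : Int) + (k : Int) * (((xs.length : Int) - r + k - 1) / k) := by
      nlinarith [h1]
    have h2 : ((r + k * (((xs.length : Int) - r + k - 1) / k).toNat : Nat) : Int)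
        = (r : Int) + (k : Int) * (((xs.length : Int) - r + k - 1) / k) := by
      push_cast [Int.toNat_of_nonneg hq]
      ring
    rw [← h2] at key
    exact_mod_cast key
  · have hmin : min (r : Int) (xs.length : Int) = (xs.length : Int) := by omega
    rw [hmin]
    simp only [min_self, if_pos (show (0 : Int) < (k : Int) by omega)]
    rw [pvColRead_nil_of_le k r xs (by omega)]
    simp only [Option.getD_some, List.filterMap_eq_nil_iff]
    intro a _
    exact List.getElem?_eq_none
      (by have hmul : 0 ≤ (k : Int) * (a : Int) := by positivity
          omega)



lemma pvColB_flatMap (c : Nat) (rows : List (List Char)) :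
    ∀ acc, pvColB rows c acc = acc ++ rows.flatMap (fun row => (row[c]?).toList) := by
  induction rows with
  | nil => intro acc; simp [pvColB]
  | cons row rest ih =>
    intro acc
    simp only [pvColB, List.foldl_cons, List.flatMap_cons]
    by_cases h : c < row.length
    · rw [dif_pos h]
      have hrec := ih (acc ++ [row[c]])
      simp only [pvColB] at hrec
      rw [hrec, List.getElem?_eq_getElem h]
      simp
    · rw [dif_neg h]
      have hrec := ih acc
      simp only [pvColB] at hrec
      rw [hrec, List.getElem?_eq_none (by omega)]
      simp

lemma pvColB_eq_colRead (xs : List Char) (k c : Nat) (hk : 0 < k) (hc : c < k) (acc : List Char) :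
    pvColB (pvRowsB xs k) c acc = acc ++ pvColRead k c xs := by
  rw [pvColB_flatMap]
  congr 1
  rw [pvRowsB, PySem.List.pyRange_of_pos 0 (xs.length : Int) (by omega : (0:Int) < (k : Int))]
  rw [List.flatMap_map, List.flatMap_map]
  have hfn : (fun j : Nat => ((PySem.List.slice xs (some ((0 : Int) + (k : Int) * (j : Int)))
          (some ((0 : Int) + (k : Int) * (j : Int) + (k : Int))))[c]?).toList)
      = (fun j : Nat => (xs[c + k * j]?).toList) := by
    funext j
    simp only [zero_add]
    rw [show (k : Int) * (j : Int) = ((k * j : Nat) : Int) by push_cast; ring]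
    rw [PySem.List.slice_natCast_add]
    congr 1
    rw [List.getElem?_take]
    rw [if_pos hc]
    rw [List.getElem?_drop]
    congr 1
    ring
  rw [hfn]
  apply pvFlatMap_eq_colRead k hk
  by_cases hn : 0 < xs.length
  · rw [if_pos (by exact_mod_cast hn)]
    have hq : 0 ≤ ((xs.length : Int) - 0 + k - 1) / k := Int.ediv_nonneg (by omega) (by omega)
    have h1 : ((xs.length : Int) - 0 + k - 1) < (((xs.length : Int) - 0 + k - 1) / k + 1) * k :=
      Int.lt_ediv_add_one_mul_self _ (by omega)
    have key : (xs.length : Int) ≤ (k : Int) * (((xs.length : Int) - 0 + k - 1) / k) := by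
      nlinarith [h1]
    have h2 : ((k * (((xs.length : Int) - 0 + k - 1) / k).toNat : Nat) : Int)
        = (k : Int) * (((xs.length : Int) - 0 + k - 1) / k) := by
      push_cast [Int.toNat_of_nonneg hq]
      ring
    rw [← h2] at key
    have : xs.length ≤ k * (((xs.length : Int) - 0 + k - 1) / k).toNat := by exact_mod_cast key
    omega
  · rw [if_neg (show ¬ ((0 : Int) < (xs.length : Int)) by omega)]
    omega



lemma pvDecipherA_eq_candB (xs : List Char) (k : Nat) (hk : 0 < k) :
    pvDecipherA xs k = pvCandB xs k := by
  unfold pvDecipherA pvCandB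
  rw [PySem.List.foldl_congr_mem (List.range k) (fun acc c => pvColB (pvRowsB xs k) c acc)
      (fun acc c => acc ++ pvColRead k c xs) []
      (fun acc c hc => pvColB_eq_colRead xs k c hk (List.mem_range.mp hc) acc)]
  rw [PySem.List.foldl_append_eq_flatMap, PySem.List.foldl_append_eq_flatMap]
  rw [show (fun r => pvSliceRowA xs r k) = (fun c => pvColRead k c xs) from
    funext fun r => pvSliceRowA_eq_colRead xs r k hk]

-- loop correspondence: A's Option state is B's (≤1-element) match list
lemma pvLoopA_eq_loopB (xs cs : List Char) :
    ∀ (ks : List Nat), (∀ k ∈ ks, 0 < k) → ∀ (out : Option (List Char)),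
      pvLoopA xs cs ks out = pvLoopB xs cs ks out.toList := by
  intro ks
  induction ks with
  | nil => intro _ out; cases out <;> rfl
  | cons k ks ih =>
    intro hpos out
    have hk : 0 < k := hpos k (by simp)
    have hks : ∀ k' ∈ ks, 0 < k' := fun k' h => hpos k' (by simp [h])
    simp only [pvLoopA, pvLoopB, pvDecipherA_eq_candB xs k hk]
    cases hin : PySem.Chars.isIn cs (pvCandB xs k) with
    | false => simp only [Bool.false_eq_true, if_false]; exact ih hks out
    | true =>
      simp only [if_true]
      cases out with
      | none => simpa using ih hks (some (pvCandB xs k))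
      | some d => simp

-- ===== VERDICT (by name: the statement is the Claim_ definition above) =====
theorem scytale_decipher_spec : Claim_equal_scytale_decipher := by
  intro ciphertext crib _
  unfold Spec_scytale_decipher scytale_decipher scytale_decipher_alt
  rw [pvLoopA_eq_loopB]
  · rfl
  · intro k hk
    simp only [List.mem_map, List.mem_range] at hk
    omega
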